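-- pv_equiv track=rewrite | github.com/yanyuandaxia/Nextcloud_task_client | nextcloudtasks.py | parse_rrule
-- ===== SOURCE A (Python) =====
-- def parse_rrule(rrule_str):
--     """
--     Parse RRULE string to (freq, interval) tuple.
--     Returns (None, 1) if invalid.
--     """
--     if not rrule_str:
--         return (None, 1)
--
--     rrule_str = rrule_str.strip()
--     parts = rrule_str.split(';')
--     freq = None
--     interval = 1
--
--     for part in parts:
--         kv = part.split('=')
--         if len(kv) != 2:
--             continue
--         k, v = kv[0].strip(), kv[1].strip()
--
--         if k == 'FREQ':
--             freq = v
--         elif k == 'INTERVAL':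
--             try:
--                 interval = int(v)
--             except:
--                 interval = 1
--
--     return (freq, interval)
-- ===== SOURCE B (Python) =====
-- def parse_rrule(rrule_str):
--     """
--     Parse RRULE string to (freq, interval) tuple.
--     Returns (None, 1) if invalid.
--     """
--     if not rrule_str:
--         return (None, 1)
--
--     parts = rrule_str.strip().split(';')
--
--     def last_value(key):
--         # last occurrence wins = first match scanning from the end
--         for part in reversed(parts):
--             kv = part.split('=')
--             if len(kv) == 2 and kv[0].strip() == key:
--                 return kv[1].strip()
--         return None
--
--     freq = last_value('FREQ')
--     v = last_value('INTERVAL')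
--     if v is None:
--         return (freq, 1)
--     try:
--         return (freq, int(v))
--     except ValueError:
--         return (freq, 1)
-- ===== Notes on version B (the rewrite author's own statement) =====
-- stated objective: alternative
-- what changed: Replaces A's single forward fold that mutates (freq, interval) with two independent backward first-match searches over the reversed parts list (last-wins becomes find-first-from-the-end, with early exit).
import Mathlib
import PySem

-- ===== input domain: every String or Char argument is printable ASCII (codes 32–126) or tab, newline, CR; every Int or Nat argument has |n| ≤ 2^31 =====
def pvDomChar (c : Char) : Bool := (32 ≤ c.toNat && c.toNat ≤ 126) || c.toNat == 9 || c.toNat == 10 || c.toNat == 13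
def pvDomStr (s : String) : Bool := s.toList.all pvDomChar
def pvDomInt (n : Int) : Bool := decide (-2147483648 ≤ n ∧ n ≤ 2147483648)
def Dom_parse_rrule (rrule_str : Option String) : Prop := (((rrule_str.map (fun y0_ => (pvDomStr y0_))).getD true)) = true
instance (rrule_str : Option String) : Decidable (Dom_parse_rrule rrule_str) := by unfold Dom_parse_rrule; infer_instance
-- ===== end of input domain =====

-- B replaces A's single forward fold over the parts with two independent backward
-- first-match searches over the reversed parts list (alternative decomposition, same cost).


-- ===== PORT A =====
-- loop body of A: if/elif updating the (freq, interval) pair in place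
def pvStepA (st : Option String × Int) (part : String) : Option String × Int :=
  let kv := (PySem.Str.split? part "=").getD []
  if kv.length ≠ 2 then st
  else
    let k := PySem.Str.strip (PySem.List.pyGetD kv 0 "")
    let v := PySem.Str.strip (PySem.List.pyGetD kv 1 "")
    if k = "FREQ" then (some v, st.2)
    else if k = "INTERVAL" then (st.1, (PySem.Int.ofStr? v).getD 1)  -- try int(v) except: 1
    else st

def parse_rrule (rrule_str : Option String) : Option String × Int :=
  match rrule_str with
  | none => (none, 1)
  | some s =>
    if s = "" then (none, 1)
    else
      (((PySem.Str.split? (PySem.Str.strip s) ";").getD [])).foldl pvStepA (none, 1)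

-- ===== PORT B =====
-- B's helper last_value(key): first match scanning the reversed parts list, early exit
def pvLastValue (key : String) : List String → Option String
  | [] => none
  | part :: rest =>
    let kv := (PySem.Str.split? part "=").getD []
    if kv.length = 2 ∧ PySem.Str.strip (PySem.List.pyGetD kv 0 "") = key
    then some (PySem.Str.strip (PySem.List.pyGetD kv 1 ""))
    else pvLastValue key rest

def parse_rrule_alt (rrule_str : Option String) : Option String × Int :=
  match rrule_str with
  | none => (none, 1)
  | some s =>
    if s = "" then (none, 1)
    else
      let parts := (PySem.Str.split? (PySem.Str.strip s) ";").getD []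
      let freq := pvLastValue "FREQ" parts.reverse
      match pvLastValue "INTERVAL" parts.reverse with
      | none => (freq, 1)
      | some v => (freq, (PySem.Int.ofStr? v).getD 1)  -- try int(v) except ValueError: 1

-- ===== PRECONDITION & SPEC =====
def Spec_parse_rrule (rrule_str : Option String) (out : Option String × Int) : Prop := out = parse_rrule_alt rrule_str
instance (rrule_str : Option String) (out : Option String × Int) : Decidable (Spec_parse_rrule rrule_str out) := by unfold Spec_parse_rrule; infer_instance

-- ===== CLAIM (what is proved, stated in full; the proofs are below) =====
def Claim_equal_parse_rrule : Prop := ∀ (rrule_str : Option String), Dom_parse_rrule rrule_str → Spec_parse_rrule rrule_str (parse_rrule rrule_str)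

-- ===== LEMMAS AND PROOFS =====
-- what A's fold computes, read off via backward searches starting from state st
def pvComb (parts : List String) (st : Option String × Int) : Option String × Int :=
  (match pvLastValue "FREQ" parts.reverse with
   | some v => some v
   | none => st.1,
   match pvLastValue "INTERVAL" parts.reverse with
   | some v => (PySem.Int.ofStr? v).getD 1
   | none => st.2)

theorem pvLastValue_append (key : String) (l1 l2 : List String) :
    pvLastValue key (l1 ++ l2) =
      (match pvLastValue key l1 with
       | some v => some v
       | none => pvLastValue key l2) := by
  induction l1 with
  | nil => simp [pvLastValue]
  | cons p ps ih =>
    simp only [List.cons_append, pvLastValue]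
    split_ifs with h <;> simp [ih]

theorem pvComb_cons (p : String) (ps : List String) (st : Option String × Int) :
    pvComb ps (pvStepA st p) = pvComb (p :: ps) st := by
  unfold pvComb pvStepA
  simp only [List.reverse_cons, pvLastValue_append]
  cases hF : pvLastValue "FREQ" ps.reverse <;>
    cases hI : pvLastValue "INTERVAL" ps.reverse <;>
    simp only [pvLastValue] <;>
    by_cases h2 : ((PySem.Str.split? p "=").getD []).length = 2 <;>
    by_cases hf : PySem.Str.strip (PySem.List.pyGetD ((PySem.Str.split? p "=").getD []) 0 "") = "FREQ" <;>
    by_cases hi : PySem.Str.strip (PySem.List.pyGetD ((PySem.Str.split? p "=").getD []) 0 "") = "INTERVAL" <;>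
    simp_all

theorem pvFold_eq_comb (parts : List String) (st : Option String × Int) :
    parts.foldl pvStepA st = pvComb parts st := by
  induction parts generalizing st with
  | nil => simp [pvComb, pvLastValue]
  | cons p ps ih => simpa [List.foldl, pvComb_cons] using ih (pvStepA st p)

-- ===== VERDICT (by name: the statement is the Claim_ definition above) =====
theorem parse_rrule_spec : Claim_equal_parse_rrule := by
  intro rrule_str _
  unfold Spec_parse_rrule parse_rrule parse_rrule_alt
  match rrule_str with
  | none => rfl
  | some s =>
    by_cases hs : s = ""
    · simp [hs]
    · simp only [hs, if_false]
      rw [pvFold_eq_comb]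
      unfold pvComb
      cases pvLastValue "FREQ" ((PySem.Str.split? (PySem.Str.strip s) ";").getD []).reverse <;>
      cases pvLastValue "INTERVAL" ((PySem.Str.split? (PySem.Str.strip s) ";").getD []).reverse <;>
      rfl
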